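-- pv_equiv track=rewrite | github.com/eoinkane/uni-sudoku | graveyard/initial_scripts/flawed_board3.py | get_sub_grid
-- ===== SOURCE A (Python) =====
-- def get_sub_grid_indexes(grid_id: int):
--     if (grid_id < 1 or grid_id > 9):
--         raise Exception("invalid input to get_sub_grid_indexes")
--
--     column_indexes = None
--     if (grid_id <= 3):
--         column_indexes = [
--             x - 1 for x in [x + (3 * (grid_id - 1)) for x in range(1, 4)]
--         ]
--         row_indexes = [x for x in range(3)]
--     elif (grid_id % 3 == 1):
--         row_indexes = [x for x in range(grid_id - 1, grid_id + 2)]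
--     elif (grid_id % 3 == 2):
--         row_indexes = [x for x in range(grid_id - 2, grid_id + 1)]
--     else:
--         row_indexes = [x for x in range(grid_id - 3, grid_id)]
--
--     if (column_indexes is None):
--         column_indexes = [
--             x - 1 for x in [
--                 x + (3 * ((grid_id - 1) % 3)) for x in range(1, 4)
--             ]]
--
--     return {
--         "row_indexes": row_indexes,
--         "column_indexes": column_indexes
--     }
--
-- def get_sub_grid(sub_grid_indexes, board, grid_id: int):
--     sub_grid_indexes = get_sub_grid_indexes(grid_id)
--     return [
--         item[
--             sub_grid_indexes["column_indexes"][0]: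
--             sub_grid_indexes["column_indexes"][-1] + 1
--         ]
--         for item in board[
--             sub_grid_indexes["row_indexes"][0]:
--             sub_grid_indexes["row_indexes"][-1] + 1
--         ]
--     ]
-- ===== SOURCE B (Python) =====
-- def get_sub_grid(sub_grid_indexes, board, grid_id: int):
--     if (grid_id < 1 or grid_id > 9):
--         raise Exception("invalid input to get_sub_grid_indexes")
--     block_row = (grid_id - 1) // 3
--     block_col = (grid_id - 1) % 3
--     return [row[3 * block_col:3 * block_col + 3]
--             for row in board[3 * block_row:3 * block_row + 3]]
-- ===== Notes on version B (the rewrite author's own statement) =====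
-- stated objective: simpler
-- what changed: Replaces the three-way branch casework building explicit row/column index lists in a dict (then re-reading their first/last elements as slice bounds) with direct block-coordinate arithmetic (grid_id-1)//3 and (grid_id-1)%3 feeding the slices.
import Mathlib
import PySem

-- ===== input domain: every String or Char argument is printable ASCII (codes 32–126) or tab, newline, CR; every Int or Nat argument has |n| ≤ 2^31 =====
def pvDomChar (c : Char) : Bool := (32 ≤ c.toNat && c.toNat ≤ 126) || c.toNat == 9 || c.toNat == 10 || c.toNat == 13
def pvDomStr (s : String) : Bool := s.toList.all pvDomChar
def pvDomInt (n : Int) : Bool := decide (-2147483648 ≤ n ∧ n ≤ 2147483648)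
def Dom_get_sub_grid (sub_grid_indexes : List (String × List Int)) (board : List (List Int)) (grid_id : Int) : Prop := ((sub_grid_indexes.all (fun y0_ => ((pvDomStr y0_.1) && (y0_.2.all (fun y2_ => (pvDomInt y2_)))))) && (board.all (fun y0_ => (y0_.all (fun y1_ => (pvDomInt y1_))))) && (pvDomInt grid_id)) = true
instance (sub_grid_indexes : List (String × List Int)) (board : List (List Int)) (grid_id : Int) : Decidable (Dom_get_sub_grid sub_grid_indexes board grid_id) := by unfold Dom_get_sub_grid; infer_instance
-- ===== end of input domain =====

-- B replaces A's branch casework and index-list dict by direct block-coordinate arithmetic (objective: simpler).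
-- ===== PORT A =====
-- helper get_sub_grid_indexes; the caller excludes grid_id < 1 ∨ grid_id > 9 (Python raises there) via Pre_
def get_sub_grid_indexes_A (grid_id : Int) : PySem.Dict String (List Int) :=
  if grid_id ≤ 3 then
    PySem.Dict.ofList
      [("row_indexes", PySem.List.pyRange 0 3 1),
       ("column_indexes",
        ((PySem.List.pyRange 1 4 1).map (fun x => x + 3 * (grid_id - 1))).map (fun x => x - 1))]
  else
    let row_indexes :=
      if PySem.Int.mod grid_id 3 = 1 then PySem.List.pyRange (grid_id - 1) (grid_id + 2) 1
      else if PySem.Int.mod grid_id 3 = 2 then PySem.List.pyRange (grid_id - 2) (grid_id + 1) 1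
      else PySem.List.pyRange (grid_id - 3) grid_id 1
    PySem.Dict.ofList
      [("row_indexes", row_indexes),
       ("column_indexes",
        ((PySem.List.pyRange 1 4 1).map (fun x => x + 3 * (PySem.Int.mod (grid_id - 1) 3))).map (fun x => x - 1))]

def get_sub_grid (sub_grid_indexes : List (String × List Int)) (board : List (List Int)) (grid_id : Int) : List (List Int) :=
  if grid_id < 1 ∨ grid_id > 9 then []  -- Python raises Exception here; excluded by Pre_
  else
    let d := get_sub_grid_indexes_A grid_id
    let rows := (PySem.Dict.get? d "row_indexes").getD []
    let cols := (PySem.Dict.get? d "column_indexes").getD []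
    -- rows/cols are nonempty for 1 ≤ grid_id ≤ 9, so the index accesses succeed; getD 0 is never taken
    (PySem.List.slice board (some ((PySem.List.pyGet? rows 0).getD 0))
        (some ((PySem.List.pyGet? rows (-1)).getD 0 + 1))).map
      (fun item =>
        PySem.List.slice item (some ((PySem.List.pyGet? cols 0).getD 0))
          (some ((PySem.List.pyGet? cols (-1)).getD 0 + 1)))

-- ===== PORT B =====
def get_sub_grid_alt (sub_grid_indexes : List (String × List Int)) (board : List (List Int)) (grid_id : Int) : List (List Int) :=
  if grid_id < 1 ∨ grid_id > 9 then []  -- Python raises Exception here; excluded by Pre_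
  else
    let block_row := PySem.Int.floordiv (grid_id - 1) 3
    let block_col := PySem.Int.mod (grid_id - 1) 3
    (PySem.List.slice board (some (3 * block_row)) (some (3 * block_row + 3))).map
      (fun row => PySem.List.slice row (some (3 * block_col)) (some (3 * block_col + 3)))

-- ===== PRECONDITION & SPEC =====
-- Pre_ excludes exactly grid_id < 1 or grid_id > 9, where Python A raises Exception
def Pre_get_sub_grid (sub_grid_indexes : List (String × List Int)) (board : List (List Int)) (grid_id : Int) : Prop :=
  1 ≤ grid_id ∧ grid_id ≤ 9
instance (sub_grid_indexes : List (String × List Int)) (board : List (List Int)) (grid_id : Int) : Decidable (Pre_get_sub_grid sub_grid_indexes board grid_id) := by unfold Pre_get_sub_grid; infer_instance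
def pvWitness_get_sub_grid : (List (String × List Int)) × List (List Int) × Int :=
  ([], [[1,2,3],[4,5,6],[7,8,9]], 5)

def Spec_get_sub_grid (sub_grid_indexes : List (String × List Int)) (board : List (List Int)) (grid_id : Int) (out : List (List Int)) : Prop := out = get_sub_grid_alt sub_grid_indexes board grid_id
instance (sub_grid_indexes : List (String × List Int)) (board : List (List Int)) (grid_id : Int) (out : List (List Int)) : Decidable (Spec_get_sub_grid sub_grid_indexes board grid_id out) := by unfold Spec_get_sub_grid; infer_instance

-- ===== CLAIM (what is proved, stated in full; the proofs are below) =====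
def Claim_equal_get_sub_grid : Prop := ∀ (sub_grid_indexes : List (String × List Int)) (board : List (List Int)) (grid_id : Int), Dom_get_sub_grid sub_grid_indexes board grid_id → Pre_get_sub_grid sub_grid_indexes board grid_id → Spec_get_sub_grid sub_grid_indexes board grid_id (get_sub_grid sub_grid_indexes board grid_id)

-- ===== LEMMAS AND PROOFS =====

-- ===== VERDICT (by name: the statement is the Claim_ definition above) =====
theorem get_sub_grid_spec : Claim_equal_get_sub_grid := by
  intro sgi board grid_id _ hpre
  obtain ⟨h1, h9⟩ := hpre
  unfold Spec_get_sub_grid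
  interval_cases grid_id <;> rfl
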